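-- pv_equiv track=rewrite | github.com/flashpoint493/VibeCollab | src/vibecollab/cli/guide.py | _extract_md_sections
-- ===== SOURCE A (Python) =====
-- from typing import Dict, List, Optional
--
-- def _extract_md_sections(text: str, start_headings: List[str]) -> str:
--     """Extract content from Markdown text starting from specified headings to next same-level heading"""
--     lines = text.splitlines()
--     result_parts: List[str] = []
--
--     for start_heading in start_headings:
--         # Determine heading level
--         heading_level = len(start_heading) - len(start_heading.lstrip("#"))
--         capturing = False
--         section_lines: List[str] = []
--
--         for line in lines:
--             if line.strip() == start_heading.strip():
--                 capturing = True
--                 section_lines = [line]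
--                 continue
--
--             if capturing:
--                 stripped = line.lstrip()
--                 if stripped.startswith("#"):
--                     line_level = len(stripped) - len(stripped.lstrip("#"))
--                     if line_level <= heading_level:
--                         break
--                 section_lines.append(line)
--
--         if section_lines:
--             result_parts.append("\n".join(section_lines))
--
--     return "\n\n".join(result_parts)
-- ===== SOURCE B (Python) =====
-- from typing import List
--
--
-- def _extract_md_sections(text: str, start_headings: List[str]) -> str:
--     """Extract each requested heading's section: from the heading line up to
--     (but not including) the next heading of the same or higher level."""
--     lines = text.splitlines()
--     stripped = [line.strip() for line in lines]
--     levels = []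
--     for line in lines:
--         s = line.lstrip()
--         levels.append(len(s) - len(s.lstrip("#")) if s.startswith("#") else 0)
--
--     parts: List[str] = []
--     for heading in start_headings:
--         level = len(heading) - len(heading.lstrip("#"))
--         try:
--             start = stripped.index(heading.strip())
--         except ValueError:
--             continue
--         end = start + 1
--         while end < len(lines) and not (0 < levels[end] <= level):
--             end += 1
--         parts.append("\n".join(lines[start:end]))
--     return "\n\n".join(parts)
-- ===== Notes on version B (the rewrite author's own statement) =====
-- stated objective: alternative
-- what changed: A rescans all lines per heading with a stateful capture/restart/break loop; B strips lines and computes heading levels once, then per heading uses list.index for the start, a while-loop boundary scan for the end, and a slice. Pre_ excludes texts where a requested heading's stripped text matches more than one line: there A's capture-restart makes the last match before a boundary win while B takes the first match, a duplicate-heading corner where either choice is defensible.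
-- outside the precondition, e.g. on _extract_md_sections('# a\nx\n# a\ny', ['# a']): A returns '# a\ny', B returns '# a\nx'
import Mathlib
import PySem

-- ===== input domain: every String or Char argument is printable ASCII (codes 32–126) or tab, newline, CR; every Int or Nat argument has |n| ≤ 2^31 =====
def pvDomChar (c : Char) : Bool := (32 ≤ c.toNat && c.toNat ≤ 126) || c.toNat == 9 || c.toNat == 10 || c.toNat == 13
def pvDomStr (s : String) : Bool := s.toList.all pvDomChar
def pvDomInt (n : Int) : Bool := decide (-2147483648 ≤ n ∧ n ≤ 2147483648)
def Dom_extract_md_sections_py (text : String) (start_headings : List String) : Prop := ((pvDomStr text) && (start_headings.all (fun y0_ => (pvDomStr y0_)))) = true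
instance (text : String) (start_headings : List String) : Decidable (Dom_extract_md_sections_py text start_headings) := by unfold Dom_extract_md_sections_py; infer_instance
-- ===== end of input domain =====

-- B precomputes stripped lines and heading levels once, then finds each section by list.index
-- plus a boundary scan and a slice (objective: alternative decomposition, no capture state machine).

-- shared helper: len(s) - len(s.lstrip("#")) — lstrip("#") ported by hand as dropping leading '#'
-- (exact for a single-character chars argument)
def pvHashLevel (cs : List Char) : Nat := cs.length - (cs.dropWhile (· == '#')).length

-- ===== PORT A =====
-- inner 'for line in lines' loop of A; state = (capturing, section_lines); 'break' returns acc
def pvLoopA (t : List Char) (hl : Nat) : List (List Char) → Bool → List (List Char) → List (List Char)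
  | [], _, acc => acc
  | l :: rest, cap, acc =>
    if PySem.Chars.strip l == t then pvLoopA t hl rest true [l]
    else if cap then
      let st := PySem.Chars.lstrip l
      if PySem.Chars.startswith st ['#'] && decide (pvHashLevel st ≤ hl) then acc
      else pvLoopA t hl rest cap (acc ++ [l])
    else pvLoopA t hl rest cap acc

def extract_md_sections_py (text : String) (start_headings : List String) : String :=
  let lines := PySem.Chars.splitlines text.toList
  let result_parts := start_headings.foldl (fun parts h =>
    let heading_level := pvHashLevel h.toList
    let section_lines := pvLoopA (PySem.Chars.strip h.toList) heading_level lines false []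
    if section_lines ≠ [] then parts ++ [PySem.Chars.join ['\n'] section_lines] else parts) []
  String.ofList (PySem.Chars.join ['\n', '\n'] result_parts)

-- ===== PORT B =====
-- level of a line: hash level of its lstrip when it starts with '#', else 0
def pvLineLevel (l : List Char) : Nat :=
  let s := PySem.Chars.lstrip l
  if PySem.Chars.startswith s ['#'] then pvHashLevel s else 0

-- Source B's 'while end < len(lines) and not (0 < levels[end] <= level): end += 1'
def pvScanEnd (levels : List Nat) (lv : Nat) (e : Nat) : Nat :=
  if h : e < levels.length then
    if 0 < levels[e] ∧ levels[e] ≤ lv then e else pvScanEnd levels lv (e + 1)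
  else e
termination_by levels.length - e

def extract_md_sections_py_alt (text : String) (start_headings : List String) : String :=
  let lines := PySem.Chars.splitlines text.toList
  let stripped := lines.map PySem.Chars.strip
  let levels := lines.map pvLineLevel
  let parts := start_headings.foldl (fun parts h =>
    let level := pvHashLevel h.toList
    match PySem.List.index? stripped (PySem.Chars.strip h.toList) with
    | none => parts
    | some start =>
      let e := pvScanEnd levels level (start + 1)
      parts ++ [PySem.Chars.join ['\n'] (PySem.List.slice lines (some (start : Int)) (some (e : Int)))]) []
  String.ofList (PySem.Chars.join ['\n', '\n'] parts)

-- ===== PRECONDITION & SPEC =====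
-- Pre_ excludes texts in which some requested heading's stripped text matches more than one line:
-- there A's capture restarts at the later match (last match before a boundary wins) while B takes
-- the first match — a first-vs-last-match corner on duplicate headings where either is defensible.
def Pre_extract_md_sections_py (text : String) (start_headings : List String) : Prop :=
  ∀ h ∈ start_headings,
    ((PySem.Chars.splitlines text.toList).countP
      (fun l => PySem.Chars.strip l == PySem.Chars.strip h.toList)) ≤ 1
instance (text : String) (start_headings : List String) : Decidable (Pre_extract_md_sections_py text start_headings) := by unfold Pre_extract_md_sections_py; infer_instance

def pvWitness_extract_md_sections_py : String × List String := ("# a\nx\n# b\ny", ["# a"])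

def Spec_extract_md_sections_py (text : String) (start_headings : List String) (out : String) : Prop := out = extract_md_sections_py_alt text start_headings
instance (text : String) (start_headings : List String) (out : String) : Decidable (Spec_extract_md_sections_py text start_headings out) := by unfold Spec_extract_md_sections_py; infer_instance

-- ===== CLAIM (what is proved, stated in full; the proofs are below) =====
def Claim_equal_extract_md_sections_py : Prop := ∀ (text : String) (start_headings : List String), Dom_extract_md_sections_py text start_headings → Pre_extract_md_sections_py text start_headings → Spec_extract_md_sections_py text start_headings (extract_md_sections_py text start_headings)

-- ===== LEMMAS AND PROOFS =====

-- B's boundary test as a Bool on a line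
def pvBoundB (lv : Nat) (x : List Char) : Bool := decide (0 < pvLineLevel x ∧ pvLineLevel x ≤ lv)

-- the section starting at index i: the line itself plus following lines up to the next boundary
def pvSec (lv : Nat) (lines : List (List Char)) (i : Nat) : List (List Char) :=
  (lines.drop i).take (1 + ((lines.drop (i + 1)).takeWhile (fun x => !pvBoundB lv x)).length)

theorem pvHashLevel_pos {cs : List Char} (h : PySem.Chars.startswith cs ['#'] = true) :
    0 < pvHashLevel cs := by
  rcases cs with _ | ⟨c, cs⟩
  · simp [PySem.Chars.startswith] at h
  · have hc : c = '#' := by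
      have := (PySem.Chars.startswith_iff (s := c :: cs) (p := ['#'])).1 h
      rcases this with ⟨tl, htl⟩
      simpa using congrArg (·.head?) htl.symm
    subst hc
    simp only [pvHashLevel, List.dropWhile_cons, beq_self_eq_true, if_pos]
    have := List.length_dropWhile_le (p := (· == '#')) (l := cs)
    simp only [List.length_cons]
    omega

-- A's break test equals B's boundary test
theorem pvBound_eq (lv : Nat) (x : List Char) :
    (PySem.Chars.startswith (PySem.Chars.lstrip x) ['#']
      && decide (pvHashLevel (PySem.Chars.lstrip x) ≤ lv)) = pvBoundB lv x := by
  by_cases hs : PySem.Chars.startswith (PySem.Chars.lstrip x) ['#'] = true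
  · simp [pvBoundB, pvLineLevel, hs, pvHashLevel_pos hs]
  · simp [pvBoundB, pvLineLevel, hs]

-- A's capturing loop when no further line matches: append lines up to the next boundary
theorem pvLoopA_capturing (t : List Char) (lv : Nat) (rest : List (List Char))
    (hnm : ∀ x ∈ rest, ¬(PySem.Chars.strip x == t) = true) (acc : List (List Char)) :
    pvLoopA t lv rest true acc = acc ++ rest.takeWhile (fun x => !pvBoundB lv x) := by
  induction rest generalizing acc with
  | nil => simp [pvLoopA]
  | cons l rest ih =>
    have hl : ¬(PySem.Chars.strip l == t) = true := hnm l (by simp)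
    rw [pvLoopA, if_neg hl, if_pos rfl]
    simp only [pvBound_eq]
    by_cases hb : pvBoundB lv l = true
    · rw [if_pos hb, List.takeWhile_cons_of_neg (by simp [hb])]
      simp
    · rw [if_neg (by simp [hb]), ih (fun x hx => hnm x (by simp [hx])) (acc ++ [l]),
          List.takeWhile_cons_of_pos (by simp [hb])]
      simp

-- A's full loop under the uniqueness precondition, as an index?-match
theorem pvLoopA_main (t : List Char) (lv : Nat) (lines : List (List Char))
    (hcnt : lines.countP (fun x => PySem.Chars.strip x == t) ≤ 1) :
    pvLoopA t lv lines false [] =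
      match PySem.List.index? (lines.map PySem.Chars.strip) t with
      | none => []
      | some i => pvSec lv lines i := by
  induction lines with
  | nil => simp [pvLoopA, PySem.List.index?]
  | cons l rest ih =>
    by_cases hl : (PySem.Chars.strip l == t) = true
    · have hrest : ∀ x ∈ rest, ¬(PySem.Chars.strip x == t) = true := by
        intro x hx hxm
        have h1 : 1 ≤ rest.countP (fun x => PySem.Chars.strip x == t) :=
          List.one_le_countP_iff.mpr ⟨x, hx, hxm⟩
        rw [List.countP_cons, if_pos hl] at hcnt
        omega
      rw [pvLoopA, if_pos hl]
      rw [pvLoopA_capturing t lv rest hrest [l]]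
      have hidx : PySem.List.index? ((l :: rest).map PySem.Chars.strip) t = some 0 := by
        have hst : PySem.Chars.strip l = t := by simpa using hl
        rw [List.map_cons, hst, PySem.List.index?_cons_self]
      have htw : rest.take ((rest.takeWhile (fun x => !pvBoundB lv x)).length)
          = rest.takeWhile (fun x => !pvBoundB lv x) :=
        (List.prefix_iff_eq_take.mp (List.takeWhile_prefix _)).symm
      have hsec : pvSec lv (l :: rest) 0
          = (l :: rest).take (1 + (rest.takeWhile (fun x => !pvBoundB lv x)).length) := by
        simp [pvSec]
      rw [hidx]
      show [l] ++ rest.takeWhile (fun x => !pvBoundB lv x) = pvSec lv (l :: rest) 0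
      rw [hsec, Nat.add_comm, List.take_succ_cons, htw]
      simp
    · have hidx : PySem.List.index? ((l :: rest).map PySem.Chars.strip) t
          = (PySem.List.index? (rest.map PySem.Chars.strip) t).map (· + 1) := by
        apply PySem.List.index?_cons_of_ne
        intro he
        exact hl (by simp [he])
      rw [pvLoopA, if_neg hl]
      simp only [Bool.false_eq_true, ite_false]
      rw [ih (by rw [List.countP_cons, if_neg hl] at hcnt; omega)]
      rw [hidx]
      cases PySem.List.index? (rest.map PySem.Chars.strip) t with
      | none => simp
      | some i => simp [pvSec, List.drop_succ_cons]

-- Source B's while loop finds exactly the end of the boundary-free run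
theorem pvScanEnd_eq (levels : List Nat) (lv : Nat) (e : Nat) :
    pvScanEnd levels lv e
      = e + ((levels.drop e).takeWhile (fun n => !decide (0 < n ∧ n ≤ lv))).length := by
  by_cases h : e < levels.length
  · have hdrop : levels.drop e = levels[e] :: levels.drop (e + 1) :=
      List.drop_eq_getElem_cons h
    rw [pvScanEnd, dif_pos h]
    by_cases hb : 0 < levels[e] ∧ levels[e] ≤ lv
    · rw [if_pos hb, hdrop, List.takeWhile_cons_of_neg (by simp [hb])]
      simp
    · rw [if_neg hb, pvScanEnd_eq levels lv (e + 1), hdrop,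
          List.takeWhile_cons_of_pos (by simp [hb])]
      simp only [List.length_cons]
      omega
  · rw [pvScanEnd, dif_neg h]
    rw [List.drop_of_length_le (by omega)]
    simp
termination_by levels.length - e
decreasing_by omega

-- B's slice equals the same section
theorem pvSlice_eq (lv : Nat) (lines : List (List Char)) (i : Nat) :
    PySem.List.slice lines (some (i : Int))
        (some ((pvScanEnd (lines.map pvLineLevel) lv (i + 1) : Nat) : Int))
      = pvSec lv lines i := by
  rw [PySem.List.slice_natCast, pvScanEnd_eq]
  have hmap : ((lines.map pvLineLevel).drop (i + 1)).takeWhile (fun n => !decide (0 < n ∧ n ≤ lv))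
      = ((lines.drop (i + 1)).takeWhile (fun x => !pvBoundB lv x)).map pvLineLevel := by
    rw [← List.map_drop, List.takeWhile_map]
    rfl
  rw [hmap, List.length_map, pvSec]
  congr 1
  omega

-- pvSec at a valid index is nonempty
theorem pvSec_ne_nil (lv : Nat) (lines : List (List Char)) (i : Nat) (hi : i < lines.length) :
    pvSec lv lines i ≠ [] := by
  have : lines.drop i ≠ [] := by
    simp [List.drop_eq_nil_iff]
    omega
  rcases List.exists_cons_of_ne_nil this with ⟨a, l', he⟩
  simp [pvSec, he]

-- ===== VERDICT (by name: the statement is the Claim_ definition above) =====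
theorem extract_md_sections_py_spec : Claim_equal_extract_md_sections_py := by
  intro text start_headings _ hpre
  unfold Spec_extract_md_sections_py extract_md_sections_py extract_md_sections_py_alt
  simp only
  congr 2
  apply PySem.List.foldl_congr_mem
  intro parts h hmem
  rw [pvLoopA_main (PySem.Chars.strip h.toList) (pvHashLevel h.toList)
      (PySem.Chars.splitlines text.toList) (hpre h hmem)]
  cases hidx : PySem.List.index? ((PySem.Chars.splitlines text.toList).map PySem.Chars.strip)
      (PySem.Chars.strip h.toList) with
  | none => simp
  | some i =>
    have hi : i < (PySem.Chars.splitlines text.toList).length := by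
      have := PySem.List.getElem_of_index?_eq_some hidx
      rcases this with ⟨hk, _⟩
      simpa using hk
    simp only [if_pos (pvSec_ne_nil _ _ _ hi), pvSlice_eq]
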